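-- pv_equiv track=rewrite | github.com/tiwpheerachan/TIWAI | backend/app/extractors/document_profile.py | _filename_hint
-- ===== SOURCE A (Python) =====
-- def _filename_hint(filename: str) -> str:
--     fn = (filename or "").lower()
--     if not fn:
--         return ""
--
--     # ads
--     if any(x in fn for x in ["meta", "facebook", "fbads", "instagram"]):
--         return "META"
--     if any(x in fn for x in ["google", "adwords"]):
--         return "GOOGLE"
--
--     # logistics first
--     if "spx" in fn or "express" in fn:
--         return "SPX"
--
--     # marketplace
--     if "shopee" in fn:
--         return "SHOPEE"
--     if "lazada" in fn or fn.startswith("laz"):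
--         return "LAZADA"
--     if "tiktok" in fn or "tts" in fn:
--         return "TIKTOK"
--
--     # thai tax invoice sometimes in name
--     if any(x in fn for x in ["tax", "invoice", "receipt", "ใบกำกับ", "ใบเสร็จ"]):
--         return "THAI_TAX"
--
--     return ""
-- ===== SOURCE B (Python) =====
-- _KEYWORDS = [
--     ("meta", "META"), ("facebook", "META"), ("fbads", "META"), ("instagram", "META"),
--     ("google", "GOOGLE"), ("adwords", "GOOGLE"),
--     ("spx", "SPX"), ("express", "SPX"),
--     ("shopee", "SHOPEE"),
--     ("lazada", "LAZADA"),
--     ("tiktok", "TIKTOK"), ("tts", "TIKTOK"),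
--     ("tax", "THAI_TAX"), ("invoice", "THAI_TAX"), ("receipt", "THAI_TAX"),
--     ("ใบกำกับ", "THAI_TAX"), ("ใบเสร็จ", "THAI_TAX"),
-- ]
-- _PRIORITY = ["META", "GOOGLE", "SPX", "SHOPEE", "LAZADA", "TIKTOK", "THAI_TAX"]
--
--
-- def _filename_hint(filename: str) -> str:
--     fn = (filename or "").lower()
--     if not fn:
--         return ""
--     # single left-to-right scan: at every position, record every keyword anchored there
--     found = set()
--     for i in range(len(fn)):
--         for kw, label in _KEYWORDS:
--             if fn.startswith(kw, i):
--                 found.add(label)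
--     if fn.startswith("laz"):
--         found.add("LAZADA")
--     for label in _PRIORITY:
--         if label in found:
--             return label
--     return ""
-- ===== Notes on version B (the rewrite author's own statement) =====
-- stated objective: alternative
-- what changed: Replaces A's chain of independent short-circuiting substring scans with a naive multi-pattern matcher: one indexed left-to-right pass over the filename records every keyword anchored at each position into a set of matched labels, then a second pass over the fixed priority list picks the first label present.
import Mathlib
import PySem

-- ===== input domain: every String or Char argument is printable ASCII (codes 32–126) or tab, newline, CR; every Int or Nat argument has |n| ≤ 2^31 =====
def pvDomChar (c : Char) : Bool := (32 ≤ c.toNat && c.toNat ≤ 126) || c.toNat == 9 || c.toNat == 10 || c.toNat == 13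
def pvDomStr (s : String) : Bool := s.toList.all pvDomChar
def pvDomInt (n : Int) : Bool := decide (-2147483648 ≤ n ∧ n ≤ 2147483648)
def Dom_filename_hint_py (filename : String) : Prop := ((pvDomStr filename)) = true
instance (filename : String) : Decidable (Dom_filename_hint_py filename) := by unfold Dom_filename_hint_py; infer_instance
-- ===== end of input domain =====

-- B replaces A's chain of independent substring scans with a single suffix-scan multi-pattern
-- matcher accumulating a label set, then a priority pick (alternative algorithm, same cost).


-- ===== PORT A =====
def filename_hint_py (filename : String) : String :=
  let fn := PySem.Str.lower filename
  if fn = "" then ""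
  else if ["meta", "facebook", "fbads", "instagram"].any (fun x => PySem.Str.isIn x fn) then "META"
  else if ["google", "adwords"].any (fun x => PySem.Str.isIn x fn) then "GOOGLE"
  else if PySem.Str.isIn "spx" fn || PySem.Str.isIn "express" fn then "SPX"
  else if PySem.Str.isIn "shopee" fn then "SHOPEE"
  else if PySem.Str.isIn "lazada" fn || PySem.Str.startswith fn "laz" then "LAZADA"
  else if PySem.Str.isIn "tiktok" fn || PySem.Str.isIn "tts" fn then "TIKTOK"
  else if ["tax", "invoice", "receipt", "ใบกำกับ", "ใบเสร็จ"].any (fun x => PySem.Str.isIn x fn) then "THAI_TAX"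
  else ""

-- ===== PORT B =====
-- Source B's _KEYWORDS table
def pvKeywords : List (String × String) :=
  [("meta", "META"), ("facebook", "META"), ("fbads", "META"), ("instagram", "META"),
   ("google", "GOOGLE"), ("adwords", "GOOGLE"),
   ("spx", "SPX"), ("express", "SPX"),
   ("shopee", "SHOPEE"),
   ("lazada", "LAZADA"),
   ("tiktok", "TIKTOK"), ("tts", "TIKTOK"),
   ("tax", "THAI_TAX"), ("invoice", "THAI_TAX"), ("receipt", "THAI_TAX"),
   ("ใบกำกับ", "THAI_TAX"), ("ใบเสร็จ", "THAI_TAX")]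

def pvPriority : List String :=
  ["META", "GOOGLE", "SPX", "SHOPEE", "LAZADA", "TIKTOK", "THAI_TAX"]

-- Source B's position scan "for i in range(len(fn)): for kw,label in _KEYWORDS: if fn.startswith(kw, i): found.add(label)"
-- (recursion over the remaining suffix fn[i:]; startswith(kw, i) = the suffix starts with kw)
def pvScan : List Char → PySem.Set String → PySem.Set String
  | [], found => found
  | c :: rest, found =>
      pvScan rest
        (pvKeywords.foldl
          (fun acc p => if PySem.Chars.startswith (c :: rest) p.1.toList then PySem.Set.add acc p.2 else acc)
          found)

-- Source B's "for label in _PRIORITY: if label in found: return label; return ''"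
def pvPick (found : PySem.Set String) : List String → String
  | [] => ""
  | l :: rest => if PySem.Set.contains found l then l else pvPick found rest

def filename_hint_py_alt (filename : String) : String :=
  let fn := PySem.Str.lower filename
  if fn = "" then ""
  else
    let found := pvScan fn.toList PySem.Set.empty
    let found := if PySem.Chars.startswith fn.toList "laz".toList then PySem.Set.add found "LAZADA" else found
    pvPick found pvPriority

-- ===== PRECONDITION & SPEC =====
def Spec_filename_hint_py (filename : String) (out : String) : Prop := out = filename_hint_py_alt filename
instance (filename : String) (out : String) : Decidable (Spec_filename_hint_py filename out) := by unfold Spec_filename_hint_py; infer_instance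

-- ===== CLAIM =====
def Claim_equal_filename_hint_py : Prop := ∀ (filename : String), Dom_filename_hint_py filename → Spec_filename_hint_py filename (filename_hint_py filename)

-- ===== LEMMAS AND PROOFS =====

-- membership after the inner keyword fold
theorem pv_mem_foldl (s : List Char) (found : PySem.Set String) (l : String)
    (ks : List (String × String)) :
    (l ∈ ks.foldl
        (fun acc p => if PySem.Chars.startswith s p.1.toList then PySem.Set.add acc p.2 else acc)
        found)
      ↔ l ∈ found ∨ ∃ p ∈ ks, PySem.Chars.startswith s p.1.toList = true ∧ p.2 = l := by
  induction ks generalizing found with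
  | nil => simp
  | cons p ks ih =>
    simp only [List.foldl_cons, ih, List.mem_cons]
    by_cases h : PySem.Chars.startswith s p.1.toList = true
    · simp only [h, if_true, PySem.Set.mem_add]
      constructor
      · rintro ((h1 | h1) | ⟨q, hq, hs, hl⟩)
        · exact Or.inl h1
        · exact Or.inr ⟨p, Or.inl rfl, h, h1.symm⟩
        · exact Or.inr ⟨q, Or.inr hq, hs, hl⟩
      · rintro (h1 | ⟨q, (rfl | hq), hs, hl⟩)
        · exact Or.inl (Or.inl h1)
        · exact Or.inl (Or.inr hl.symm)
        · exact Or.inr ⟨q, hq, hs, hl⟩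
    · rw [if_neg h]
      constructor
      · rintro (h1 | ⟨q, hq, hs, hl⟩)
        · exact Or.inl h1
        · exact Or.inr ⟨q, Or.inr hq, hs, hl⟩
      · rintro (h1 | ⟨q, (rfl | hq), hs, hl⟩)
        · exact Or.inl h1
        · exact absurd hs h
        · exact Or.inr ⟨q, hq, hs, hl⟩

-- membership after the whole suffix scan
theorem pv_mem_scan (s : List Char) (found : PySem.Set String) (l : String) :
    l ∈ pvScan s found
      ↔ l ∈ found ∨ ∃ p ∈ pvKeywords, (∃ j, p.1.toList <+: s.drop j) ∧ p.2 = l := by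
  induction s generalizing found with
  | nil =>
    simp only [pvScan]
    constructor
    · exact Or.inl
    · rintro (h | ⟨p, _, ⟨j, hj⟩, _⟩)
      · exact h
      · simp only [List.drop_nil] at hj
        rcases p with ⟨kw, lab⟩
        -- every keyword in the table is nonempty, so none is a prefix of []
        have h0 : kw.toList = [] := List.prefix_nil.mp hj
        rename_i hmem _
        simp only [pvKeywords, List.mem_cons, List.not_mem_nil, or_false, Prod.mk.injEq] at hmem
        rcases hmem with h|h|h|h|h|h|h|h|h|h|h|h|h|h|h|h|h <;>
          (rw [h.1] at h0; exact absurd h0 (by decide))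
  | cons c rest ih =>
    simp only [pvScan, ih, pv_mem_foldl]
    constructor
    · rintro ((h | ⟨p, hp, hs, hl⟩) | ⟨p, hp, ⟨j, hj⟩, hl⟩)
      · exact Or.inl h
      · exact Or.inr ⟨p, hp, ⟨0, by simpa [PySem.Chars.startswith_iff] using hs⟩, hl⟩
      · exact Or.inr ⟨p, hp, ⟨j + 1, by simpa using hj⟩, hl⟩
    · rintro (h | ⟨p, hp, ⟨j, hj⟩, hl⟩)
      · exact Or.inl (Or.inl h)
      · cases j with
        | zero =>
          exact Or.inl (Or.inr ⟨p, hp, by simpa [PySem.Chars.startswith_iff] using hj, hl⟩)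
        | succ j =>
          exact Or.inr ⟨p, hp, ⟨j, by simpa using hj⟩, hl⟩

-- specialise: membership in the scanned set = some keyword of that label occurs in fn
theorem pv_mem_scan_isIn (s : List Char) (l : String) :
    l ∈ pvScan s PySem.Set.empty
      ↔ ∃ p ∈ pvKeywords, PySem.Chars.isIn p.1.toList s = true ∧ p.2 = l := by
  rw [pv_mem_scan]
  simp only [PySem.Set.empty]
  constructor
  · rintro (h | ⟨p, hp, ⟨j, hj⟩, hl⟩)
    · simp at h
    · exact ⟨p, hp, (PySem.Chars.exists_prefix_drop_iff_isIn _ _).1 ⟨j, hj⟩, hl⟩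
  · rintro ⟨p, hp, hin, hl⟩
    exact Or.inr ⟨p, hp, (PySem.Chars.exists_prefix_drop_iff_isIn _ _).2 hin, hl⟩

-- ===== VERDICT =====
set_option maxHeartbeats 2000000 in
theorem filename_hint_py_spec : Claim_equal_filename_hint_py := by
  intro filename _
  unfold Spec_filename_hint_py filename_hint_py filename_hint_py_alt
  set fn := PySem.Str.lower filename with hfn
  by_cases hempty : fn = ""
  · simp [hempty]
  · simp only [hempty, if_false]
    set base := pvScan fn.toList PySem.Set.empty with hbase
    set found := (if PySem.Chars.startswith fn.toList "laz".toList = true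
                  then PySem.Set.add base "LAZADA" else base) with hfound
    have hfmem : ∀ l : String, (l ∈ found) ↔
        ((∃ p ∈ pvKeywords, PySem.Chars.isIn p.1.toList fn.toList = true ∧ p.2 = l) ∨
         (PySem.Chars.startswith fn.toList "laz".toList = true ∧ l = "LAZADA")) := by
      intro l
      rw [hfound]
      split_ifs with hl
      · rw [PySem.Set.mem_add, hbase, pv_mem_scan_isIn]
        have hl' : PySem.Chars.startswith fn.toList ['l', 'a', 'z'] = true := by
          simpa using hl
        simp [hl']
      · rw [hbase, pv_mem_scan_isIn]
        rw [Bool.not_eq_true] at hl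
        have hl' : PySem.Chars.startswith fn.toList ['l', 'a', 'z'] = false := by
          simpa using hl
        simp [hl']
    have cM : PySem.Set.contains found "META"
        = (["meta", "facebook", "fbads", "instagram"].any fun x => PySem.Str.isIn x fn) := by
      rw [Bool.eq_iff_iff, PySem.Set.contains_iff, hfmem]
      simp [pvKeywords]
    have cG : PySem.Set.contains found "GOOGLE"
        = (["google", "adwords"].any fun x => PySem.Str.isIn x fn) := by
      rw [Bool.eq_iff_iff, PySem.Set.contains_iff, hfmem]
      simp [pvKeywords]
    have cS : PySem.Set.contains found "SPX"
        = (PySem.Str.isIn "spx" fn || PySem.Str.isIn "express" fn) := by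
      rw [Bool.eq_iff_iff, PySem.Set.contains_iff, hfmem]
      simp [pvKeywords]
    have cSh : PySem.Set.contains found "SHOPEE" = PySem.Str.isIn "shopee" fn := by
      rw [Bool.eq_iff_iff, PySem.Set.contains_iff, hfmem]
      simp [pvKeywords]
    have cL : PySem.Set.contains found "LAZADA"
        = (PySem.Str.isIn "lazada" fn || PySem.Str.startswith fn "laz") := by
      rw [Bool.eq_iff_iff, PySem.Set.contains_iff, hfmem]
      simp [pvKeywords]
    have cT : PySem.Set.contains found "TIKTOK"
        = (PySem.Str.isIn "tiktok" fn || PySem.Str.isIn "tts" fn) := by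
      rw [Bool.eq_iff_iff, PySem.Set.contains_iff, hfmem]
      simp [pvKeywords]
    have cTT : PySem.Set.contains found "THAI_TAX"
        = (["tax", "invoice", "receipt", "ใบกำกับ", "ใบเสร็จ"].any fun x => PySem.Str.isIn x fn) := by
      rw [Bool.eq_iff_iff, PySem.Set.contains_iff, hfmem]
      simp [pvKeywords]
    simp only [pvPriority, pvPick]
    rw [cM, cG, cS, cSh, cL, cT, cTT]
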